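-- pv_equiv track=rewrite | github.com/FedericoMarcuzzi/resilience-verification | gen_data/misc.py | gen_name
-- ===== SOURCE A (Python) =====
-- import itertools
-- import string
--
-- def gen_name(dim):
--     size = 1
--     while dim > 0:
--         for i in itertools.product(string.ascii_letters, repeat = size):
--             word = ''.join(i)
--             yield word
--             dim -=1
--             if dim == 0:
--                 break
--
--         size += 1
-- ===== SOURCE B (Python) =====
-- import string
--
-- def gen_name(dim):
--     # bijective base-52 encoding: the n-th name (1-based) computed directly from n
--     letters = string.ascii_letters
--     for n in range(1, dim + 1):
--         m = n
--         word = ''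
--         while m:
--             m -= 1
--             word = letters[m % 52] + word
--             m //= 52
--         yield word
-- ===== Notes on version B (the rewrite author's own statement) =====
-- stated objective: alternative
-- what changed: Replaces the itertools.product enumeration over growing word lengths by a direct bijective base-52 encoding that computes each name from its ordinal.
import Mathlib
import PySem

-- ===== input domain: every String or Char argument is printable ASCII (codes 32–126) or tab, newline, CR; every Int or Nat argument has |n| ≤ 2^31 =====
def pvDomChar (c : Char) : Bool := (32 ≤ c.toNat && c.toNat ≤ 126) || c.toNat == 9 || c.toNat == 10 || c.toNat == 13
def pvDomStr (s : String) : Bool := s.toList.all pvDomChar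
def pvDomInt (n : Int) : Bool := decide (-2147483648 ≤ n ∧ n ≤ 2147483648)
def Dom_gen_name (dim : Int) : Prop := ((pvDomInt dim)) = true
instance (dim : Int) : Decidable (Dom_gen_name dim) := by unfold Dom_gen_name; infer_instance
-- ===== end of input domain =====

-- B replaces A's itertools.product enumeration over growing word lengths by a direct
-- bijective base-52 encoding of each ordinal (alternative algorithm, same output list).

-- ===== PORT A =====
-- string.ascii_letters
def lettersL : List Char := "abcdefghijklmnopqrstuvwxyzABCDEFGHIJKLMNOPQRSTUVWXYZ".toList

-- itertools.product(string.ascii_letters, repeat = size), as lists of chars,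
-- in product order (rightmost position varies fastest)
def prodL : Nat → List (List Char)
  | 0 => [[]]
  | s + 1 => (prodL s).flatMap (fun w => lettersL.map (fun c => w ++ [c]))

-- the inner `for i in …: word = ''.join(i); yield word; dim -= 1; if dim == 0: break`
-- returns the yielded words and the remaining value of dim
def innerLoop : List (List Char) → Int → (List String × Int)
  | [], d => ([], d)
  | i :: rest, d =>
      if d - 1 = 0 then ([String.ofList i], 0)
      else
        (String.ofList i :: (innerLoop rest (d - 1)).1, (innerLoop rest (d - 1)).2)

lemma innerLoop_snd_le : ∀ (l : List (List Char)) (d : Int), 0 < d →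
    0 ≤ (innerLoop l d).2 ∧ (innerLoop l d).2 ≤ d := by
  intro l
  induction l with
  | nil => intro d hd; simp [innerLoop]; omega
  | cons i rest ih =>
      intro d hd
      simp only [innerLoop]
      by_cases h : d - 1 = 0
      · simp [h]; omega
      · simp only [h, if_false]
        have := ih (d - 1) (by omega)
        omega

lemma innerLoop_snd_lt : ∀ (l : List (List Char)) (d : Int), 0 < d → l ≠ [] →
    0 ≤ (innerLoop l d).2 ∧ (innerLoop l d).2 < d := by
  intro l d hd hl
  cases l with
  | nil => exact absurd rfl hl
  | cons i rest =>
      simp only [innerLoop]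
      by_cases h : d - 1 = 0
      · simp [h]; omega
      · simp only [h, if_false]
        have := innerLoop_snd_le rest (d - 1) (by omega)
        omega

lemma prodL_ne_nil : ∀ s, prodL s ≠ [] := by
  intro s
  induction s with
  | zero => simp [prodL]
  | succ s ih =>
      simp only [prodL, ne_eq, List.flatMap_eq_nil_iff]
      intro h
      cases hp : prodL s with
      | nil => exact ih hp
      | cons w rest =>
          have := h w (by rw [hp]; exact List.mem_cons_self)
          simp [lettersL] at this

-- the outer `while dim > 0:` loop; size grows, dim shrinks
def gen_name_aux (d : Int) (size : Nat) : List String :=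
  if h : d ≤ 0 then []
  else
    let p := innerLoop (prodL size) d
    p.1 ++ gen_name_aux p.2 (size + 1)
termination_by d.toNat
decreasing_by
  have := innerLoop_snd_lt (prodL size) d (by omega) (prodL_ne_nil size)
  omega

def gen_name (dim : Int) : List String := gen_name_aux dim 1

-- ===== PORT B =====
-- the `while m:` loop of B: bijective base-52 digits of m over ascii_letters
def encInt (m : Int) : List Char :=
  if h : m ≤ 0 then []
  else
    let n := m - 1
    encInt (PySem.Int.floordiv n 52) ++ [lettersL.getD (PySem.Int.mod n 52).toNat 'a']
termination_by m.toNat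
decreasing_by
  rw [PySem.Int.floordiv_eq_ediv_of_pos (by norm_num)]
  omega

def gen_name_alt (dim : Int) : List String :=
  (PySem.List.pyRange 1 (dim + 1) 1).map (fun n => String.ofList (encInt n))

-- ===== PRECONDITION & SPEC =====
def Spec_gen_name (dim : Int) (out : List String) : Prop := out = gen_name_alt dim
instance (dim : Int) (out : List String) : Decidable (Spec_gen_name dim out) := by unfold Spec_gen_name; infer_instance

-- ===== CLAIM (what is proved, stated in full; the proofs are below) =====
def Claim_equal_gen_name : Prop := ∀ (dim : Int), Dom_gen_name dim → Spec_gen_name dim (gen_name dim)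

-- ===== LEMMAS AND PROOFS =====

-- Nat-level version of B's digit loop
def encL : Nat → List Char
  | 0 => []
  | n + 1 => encL (n / 52) ++ [lettersL.getD (n % 52) 'a']
decreasing_by
  exact Nat.lt_succ_of_le (Nat.div_le_self n 52)

lemma encInt_natCast : ∀ n : Nat, encInt (n : Int) = encL n := by
  intro n
  induction n using Nat.strong_induction_on with
  | _ n ih =>
      cases n with
      | zero => simp [encInt, encL]
      | succ n =>
          rw [encInt]
          have h0 : ¬ ((n : Int) + 1 ≤ 0) := by omega
          have hsub : ((n : Nat) + 1 : Int) - 1 = (n : Int) := by push_cast; ring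
          simp only [Nat.cast_add, Nat.cast_one, h0, dite_false, hsub]
          have hdiv : PySem.Int.floordiv (n : Int) 52 = ((n / 52 : Nat) : Int) := by
            exact_mod_cast PySem.Int.floordiv_natCast n 52
          have hmod : PySem.Int.mod (n : Int) 52 = ((n % 52 : Nat) : Int) := by
            exact_mod_cast PySem.Int.mod_natCast n 52
          rw [hdiv, hmod, ih (n / 52) (Nat.lt_succ_of_le (Nat.div_le_self n 52)),
            Int.toNat_natCast]
          conv_rhs => rw [encL]

-- ordinal of the first word of length s (0-based, counting "" as ordinal 0)
def Bnum : Nat → Nat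
  | 0 => 0
  | s + 1 => 52 * Bnum s + 1

lemma Bnum_succ_add : ∀ s, Bnum (s + 1) = Bnum s + 52 ^ s := by
  intro s
  induction s with
  | zero => simp [Bnum]
  | succ s ih =>
      calc Bnum (s + 2) = 52 * Bnum (s + 1) + 1 := rfl
        _ = 52 * (Bnum s + 52 ^ s) + 1 := by rw [ih]
        _ = (52 * Bnum s + 1) + 52 ^ (s + 1) := by ring
        _ = Bnum (s + 1) + 52 ^ (s + 1) := rfl

lemma prodL_length : ∀ s, (prodL s).length = 52 ^ s := by
  intro s
  induction s with
  | zero => simp [prodL]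
  | succ s ih =>
      rw [show prodL (s + 1) = (prodL s).flatMap (fun w => lettersL.map (fun c => w ++ [c]))
        from rfl]
      rw [List.length_flatMap]
      have h : ((prodL s).map (fun w => (lettersL.map (fun c => w ++ [c])).length))
          = (prodL s).map (fun _ => 52) :=
        List.map_congr_left (fun w _ => by simp [lettersL])
      rw [h, List.map_const', List.sum_replicate, ih, smul_eq_mul]
      ring

lemma getD_flatMap : ∀ (l : List (List Char)) (i : Nat), i < l.length * 52 →
    (l.flatMap (fun w => lettersL.map (fun c => w ++ [c]))).getD i []
      = l.getD (i / 52) [] ++ [lettersL.getD (i % 52) 'a'] := by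
  intro l
  induction l with
  | nil => intro i hi; simp at hi
  | cons w rest ih =>
      intro i hi
      simp only [List.flatMap_cons]
      by_cases h : i < 52
      · have hd : i / 52 = 0 := Nat.div_eq_of_lt h
        have hm : i % 52 = i := Nat.mod_eq_of_lt h
        have hlen : i < (lettersL.map (fun c => w ++ [c])).length := by
          simpa [lettersL] using h
        rw [List.getD_append _ _ _ _ hlen]
        rw [List.getD_eq_getElem _ _ hlen, List.getElem_map]
        rw [hd, hm]
        have hi' : i < lettersL.length := by simpa [lettersL] using h
        rw [List.getD_eq_getElem lettersL _ hi']
        simp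
      · have hlen52 : (lettersL.map (fun c => w ++ [c])).length = 52 := by simp [lettersL]
        have hrest : i - 52 < rest.length * 52 := by
          simp only [List.length_cons] at hi; omega
        rw [List.getD_append_right _ _ _ _ (by rw [hlen52]; omega)]
        rw [hlen52, ih (i - 52) hrest]
        have hdiv : i / 52 = (i - 52) / 52 + 1 := by omega
        have hmod : (i - 52) % 52 = i % 52 := by omega
        rw [hmod, hdiv, List.getD_cons_succ]

lemma enc_block : ∀ s i, i < 52 ^ s → encL (Bnum s + i) = (prodL s).getD i [] := by
  intro s
  induction s with
  | zero =>
      intro i hi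
      interval_cases i
      simp [Bnum, encL, prodL]
  | succ s ih =>
      intro i hi
      have hj : i / 52 < 52 ^ s := by
        have : 52 ^ (s + 1) = 52 ^ s * 52 := by ring
        rw [this] at hi
        exact Nat.div_lt_of_lt_mul (by omega)
      have hkey : Bnum (s + 1) + i = (52 * (Bnum s + i / 52) + i % 52) + 1 := by
        have hB : Bnum (s + 1) = 52 * Bnum s + 1 := rfl
        have := Nat.div_add_mod i 52
        omega
      rw [hkey]
      show encL ((52 * (Bnum s + i / 52) + i % 52) + 1) = _
      rw [encL]
      have hdiv : (52 * (Bnum s + i / 52) + i % 52) / 52 = Bnum s + i / 52 := by omega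
      have hmod : (52 * (Bnum s + i / 52) + i % 52) % 52 = i % 52 := by omega
      rw [hdiv, hmod, ih (i / 52) hj]
      have hi' : i < (prodL s).length * 52 := by
        rw [prodL_length]
        have : 52 ^ (s + 1) = 52 ^ s * 52 := by ring
        omega
      rw [show prodL (s + 1) = (prodL s).flatMap (fun w => lettersL.map (fun c => w ++ [c])) from rfl]
      rw [getD_flatMap (prodL s) i hi']

-- i-th word of the sequence starting at word length s
def seqEl (s i : Nat) : List Char :=
  if i < 52 ^ s then (prodL s).getD i []
  else seqEl (s + 1) (i - 52 ^ s)
termination_by i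
decreasing_by
  have : 0 < 52 ^ s := Nat.pow_pos (by omega : 0 < 52)
  omega

lemma enc_seqEl : ∀ i s, encL (Bnum s + i) = seqEl s i := by
  intro i
  induction i using Nat.strong_induction_on with
  | _ i ih =>
      intro s
      rw [seqEl]
      by_cases h : i < 52 ^ s
      · rw [if_pos h]; exact enc_block s i h
      · rw [if_neg h]
        have hpos : 0 < 52 ^ s := Nat.pow_pos (by omega : 0 < 52)
        have heq : Bnum s + i = Bnum (s + 1) + (i - 52 ^ s) := by
          rw [Bnum_succ_add]; omega
        rw [heq]
        exact ih (i - 52 ^ s) (by omega) (s + 1)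

lemma take_eq_map_range {α : Type} (l : List α) (t : Nat) (d : α) (ht : t ≤ l.length) :
    l.take t = (List.range t).map (fun i => l.getD i d) := by
  apply List.ext_getElem
  · simp; omega
  · intro i h1 h2
    simp only [List.getElem_take, List.getElem_map, List.getElem_range]
    rw [List.getD_eq_getElem _ _ (by simp at h1; omega)]

lemma innerLoop_eq : ∀ (l : List (List Char)) (d : Int), 0 < d →
    innerLoop l d = ((l.take d.toNat).map String.ofList, d - min d l.length) := by
  intro l
  induction l with
  | nil => intro d hd; simp [innerLoop]; omega
  | cons i rest ih =>
      intro d hd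
      simp only [innerLoop]
      by_cases h : d - 1 = 0
      · have : d = 1 := by omega
        subst this
        simp [h]
      · rw [if_neg h, ih (d - 1) (by omega)]
        have ht : d.toNat = (d - 1).toNat + 1 := by omega
        rw [ht]
        simp only [List.take_succ_cons, List.map_cons, List.length_cons]
        rw [Prod.mk.injEq]
        exact ⟨rfl, by push_cast; omega⟩

lemma gen_name_aux_eq : ∀ (t : Nat) (d : Int) (s : Nat), d.toNat = t →
    gen_name_aux d s = (List.range d.toNat).map (fun i => String.ofList (seqEl s i)) := by
  intro t
  induction t using Nat.strong_induction_on with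
  | _ t ih =>
      intro d s ht
      rw [gen_name_aux]
      by_cases h : d ≤ 0
      · rw [dif_pos h]
        have : d.toNat = 0 := by omega
        simp [this]
      · rw [dif_neg h]
        have hd : 0 < d := by omega
        rw [innerLoop_eq (prodL s) d hd]
        have hL : (prodL s).length = 52 ^ s := prodL_length s
        have hLpos : 0 < 52 ^ s := Nat.pow_pos (by omega : 0 < 52)
        by_cases hc : d.toNat ≤ 52 ^ s
        · -- all remaining words fit in this size; the recursive call is on 0
          have hmin : min d ((prodL s).length : Int) = d := by
            rw [hL]; omega
          simp only [hmin, sub_self]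
          rw [gen_name_aux]
          simp only [le_refl, dif_pos, List.append_nil]
          rw [take_eq_map_range (prodL s) d.toNat [] (by omega), List.map_map]
          apply List.map_congr_left
          intro i hi
          simp only [List.mem_range] at hi
          simp only [Function.comp]
          rw [seqEl, if_pos (by omega)]
        · -- this whole size is consumed; recurse at size s+1
          have hmin : min d ((prodL s).length : Int) = ((52 ^ s : Nat) : Int) := by
            rw [hL]; omega
          simp only [hmin]
          have htake : (prodL s).take d.toNat = prodL s :=
            List.take_of_length_le (by omega)
          rw [htake]
          have hrec : (d - ((52 ^ s : Nat) : Int)).toNat = d.toNat - 52 ^ s := by omega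
          rw [ih (d.toNat - 52 ^ s) (by omega) (d - ((52 ^ s : Nat) : Int)) (s + 1) hrec, hrec]
          have hsplit : d.toNat = 52 ^ s + (d.toNat - 52 ^ s) := by omega
          rw [hsplit, List.range_add, List.map_append, List.map_map]
          congr 1
          · have htake2 : prodL s = (List.range (52 ^ s)).map (fun i => (prodL s).getD i []) := by
              have h0 := take_eq_map_range (prodL s) (prodL s).length [] le_rfl
              rw [List.take_length, hL] at h0
              exact h0
            rw [htake2, List.map_map]
            apply List.map_congr_left
            intro i hi
            simp only [List.mem_range] at hi
            simp only [Function.comp]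
            rw [seqEl, if_pos hi]
          · rw [show 52 ^ s + (d.toNat - 52 ^ s) - 52 ^ s = d.toNat - 52 ^ s from by omega]
            apply List.map_congr_left
            intro i _
            simp only [Function.comp]
            conv_rhs => rw [seqEl]
            rw [if_neg (show ¬ (52 ^ s + i < 52 ^ s) from by omega)]
            rw [show 52 ^ s + i - 52 ^ s = i from by omega]

-- ===== VERDICT (by name: the statement is the Claim_ definition above) =====
theorem gen_name_spec : Claim_equal_gen_name := by
  intro dim _
  unfold Spec_gen_name gen_name gen_name_alt
  rw [PySem.List.pyRange_one]
  have harg : (dim + 1 - 1).toNat = dim.toNat := by omega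
  rw [harg, List.map_map]
  rw [gen_name_aux_eq dim.toNat dim 1 rfl]
  apply List.map_congr_left
  intro i _
  simp only [Function.comp]
  have : (1 : Int) + (i : Int) = ((i + 1 : Nat) : Int) := by push_cast; ring
  rw [this, encInt_natCast]
  have hB : i + 1 = Bnum 1 + i := by simp [Bnum, Nat.add_comm]
  rw [hB, enc_seqEl]
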